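-- pv_equiv track=rewrite | github.com/snusfnf-png/grupps-bot | bot.py | calc_coins
-- ===== SOURCE A (Python) =====
-- def calc_coins(chars: str, country: str) -> tuple[int, str]:
--     digits = [c for c in chars if c.isdigit()]
--     if not digits:
--         return 5, "Обычный"
--     if len(digits) >= 3 and len(set(digits)) == 1:
--         return 100, "🏆 Легендарный"
--     digit_str = "".join(digits)
--     has_quad = (len(digit_str) >= 4 and
--                 any(digit_str[i]==digit_str[i+1]==digit_str[i+2]==digit_str[i+3]
--                     for i in range(len(digit_str)-3)))
--     if has_quad:
--         return 40, "🔥 Четвёрка"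
--     has_triple = (len(digit_str) >= 3 and
--                   any(digit_str[i]==digit_str[i+1]==digit_str[i+2]
--                       for i in range(len(digit_str)-2)))
--     if has_triple:
--         return 25, "✨ Тройник"
--     if len(digits) >= 3 and digits == digits[::-1]:
--         return 15, "🪞 Зеркальный"
--     asc  = all(int(digits[i+1])==int(digits[i])+1 for i in range(len(digits)-1))
--     desc = all(int(digits[i+1])==int(digits[i])-1 for i in range(len(digits)-1))
--     if (asc or desc) and len(digits) >= 3:
--         return 10, "⭐ Красивый"
--     return 5, "Обычный"
-- ===== SOURCE B (Python) =====
-- def calc_coins(chars: str, country: str) -> tuple[int, str]: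
--     digits = [c for c in chars if c.isdigit()]
--     if not digits:
--         return 5, "Обычный"
--     if len(digits) >= 3 and all(c == digits[0] for c in digits):
--         return 100, "🏆 Легендарный"
--     # run-length structure of the digit sequence, built once
--     runs = []
--     cur, cnt = digits[0], 1
--     for c in digits[1:]:
--         if c == cur:
--             cnt += 1
--         else:
--             runs.append(cnt)
--             cur, cnt = c, 1
--     runs.append(cnt)
--     if any(r >= 4 for r in runs):
--         return 40, "🔥 Четвёрка"
--     if any(r >= 3 for r in runs):
--         return 25, "✨ Тройник"
--     if len(digits) >= 3 and digits == digits[::-1]: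
--         return 15, "🪞 Зеркальный"
--     diffs = [int(b) - int(a) for a, b in zip(digits, digits[1:])]
--     if len(digits) >= 3 and (all(d == 1 for d in diffs) or all(d == -1 for d in diffs)):
--         return 10, "⭐ Красивый"
--     return 5, "Обычный"
-- ===== Notes on version B (the rewrite author's own statement) =====
-- stated objective: alternative
-- what changed: B builds the run-length structure of the digit sequence once and tests quad/triple as 'some run >= 4/3', replaces the len(set)==1 check by all-equal-to-first, and tests asc/desc on a single list of consecutive differences, instead of A's four separate windowed any/all scans over indices.
import Mathlib
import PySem

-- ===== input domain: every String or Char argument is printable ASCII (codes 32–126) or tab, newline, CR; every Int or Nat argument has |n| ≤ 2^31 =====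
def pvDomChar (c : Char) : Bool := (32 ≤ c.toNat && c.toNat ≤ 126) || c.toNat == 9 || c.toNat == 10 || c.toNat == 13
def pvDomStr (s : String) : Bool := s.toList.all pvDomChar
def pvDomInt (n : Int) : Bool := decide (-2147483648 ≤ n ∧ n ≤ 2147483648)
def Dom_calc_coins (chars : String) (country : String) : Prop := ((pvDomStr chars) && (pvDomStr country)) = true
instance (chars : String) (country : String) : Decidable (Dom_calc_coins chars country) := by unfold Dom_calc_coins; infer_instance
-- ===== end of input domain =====

-- B replaces A's four windowed/any scans by one run-length pass over the digit list (alternative decomposition, same cost).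


-- ===== PORT A =====
-- int(c) for an ASCII digit char c (exact: inside Dom, c.isdigit() holds only for '0'..'9')
def pvDigitVal (c : Char) : Int := (c.toNat : Int) - 48

-- window of 4 equal chars starting at a window head a followed by t (digit_str[i]==..[i+1]==..[i+2]==..[i+3])
def pvWinEq3 (a : Char) : List Char → Bool
  | b :: c :: d :: _ => a == b && b == c && c == d
  | _ => false

-- window of 3 equal chars
def pvWinEq2 (a : Char) : List Char → Bool
  | b :: c :: _ => a == b && b == c
  | _ => false

-- any(digit_str[i]==digit_str[i+1]==digit_str[i+2]==digit_str[i+3] for i in range(len-3))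
def pvHasQuad : List Char → Bool
  | [] => false
  | a :: t => pvWinEq3 a t || pvHasQuad t

-- any(digit_str[i]==digit_str[i+1]==digit_str[i+2] for i in range(len-2))
def pvHasTriple : List Char → Bool
  | [] => false
  | a :: t => pvWinEq2 a t || pvHasTriple t

-- all(int(digits[i+1])==int(digits[i])+1 for i in range(len-1))
def pvAscA : List Char → Bool
  | [] => true
  | a :: t => (match t with
               | b :: _ => pvDigitVal b == pvDigitVal a + 1
               | [] => true) && pvAscA t

-- all(int(digits[i+1])==int(digits[i])-1 for i in range(len-1))
def pvDescA : List Char → Bool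
  | [] => true
  | a :: t => (match t with
               | b :: _ => pvDigitVal b == pvDigitVal a - 1
               | [] => true) && pvDescA t

def calc_coins (chars : String) (country : String) : Int × String :=
  let digits := List.filter (fun c => PySem.Chars.isdigit c) chars.toList
  if digits.isEmpty then (5, "Обычный")
  else if decide (3 ≤ digits.length) && ((PySem.Set.ofList digits).length == 1) then
    (100, "🏆 Легендарный")
  else
    -- digit_str = "".join(digits): same character sequence, kept as the char list
    let has_quad := decide (4 ≤ digits.length) && pvHasQuad digits
    if has_quad then (40, "🔥 Четвёрка")
    else
      let has_triple := decide (3 ≤ digits.length) && pvHasTriple digits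
      if has_triple then (25, "✨ Тройник")
      else if decide (3 ≤ digits.length) && (digits == (PySem.List.slice? digits none none (-1)).getD []) then
        (15, "🪞 Зеркальный")
      else
        let asc := pvAscA digits
        let desc := pvDescA digits
        if (asc || desc) && decide (3 ≤ digits.length) then (10, "⭐ Красивый")
        else (5, "Обычный")

-- ===== PORT B =====
-- the run-building loop: state (runs, cur, cnt), one step per digit of digits[1:]
def pvRunStep (st : List Nat × Char × Nat) (c : Char) : List Nat × Char × Nat :=
  if c == st.2.1 then (st.1, st.2.1, st.2.2 + 1) else (st.1 ++ [st.2.2], c, 1)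

def calc_coins_alt (chars : String) (country : String) : Int × String :=
  let digits := List.filter (fun c => PySem.Chars.isdigit c) chars.toList
  match digits with
  | [] => (5, "Обычный")
  | d0 :: rest =>
    if decide (3 ≤ (d0 :: rest).length) && (d0 :: rest).all (· == d0) then
      (100, "🏆 Легендарный")
    else
      let st := (PySem.List.slice (d0 :: rest) (some 1) none).foldl pvRunStep ([], d0, 1)
      let runs := st.1 ++ [st.2.2]
      if runs.any (fun r => 4 ≤ r) then (40, "🔥 Четвёрка")
      else if runs.any (fun r => 3 ≤ r) then (25, "✨ Тройник")
      else if decide (3 ≤ (d0 :: rest).length) &&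
              ((d0 :: rest) == (PySem.List.slice? (d0 :: rest) none none (-1)).getD []) then
        (15, "🪞 Зеркальный")
      else
        let diffs := (List.zip (d0 :: rest) (PySem.List.slice (d0 :: rest) (some 1) none)).map
                       (fun p => pvDigitVal p.2 - pvDigitVal p.1)
        if decide (3 ≤ (d0 :: rest).length) && (diffs.all (· == 1) || diffs.all (· == -1)) then
          (10, "⭐ Красивый")
        else (5, "Обычный")

-- ===== PRECONDITION & SPEC =====
def Spec_calc_coins (chars : String) (country : String) (out : Int × String) : Prop := out = calc_coins_alt chars country
instance (chars : String) (country : String) (out : Int × String) : Decidable (Spec_calc_coins chars country out) := by unfold Spec_calc_coins; infer_instance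

-- ===== CLAIM (what is proved, stated in full; the proofs are below) =====
def Claim_equal_calc_coins : Prop := ∀ (chars : String) (country : String), Dom_calc_coins chars country → Spec_calc_coins chars country (calc_coins chars country)

-- ===== LEMMAS AND PROOFS =====
def pvLead (a : Char) : List Char → Nat
  | [] => 0
  | b :: t => if b == a then pvLead a t + 1 else 0

theorem pvWinEq3_eq (a : Char) (t : List Char) :
    pvWinEq3 a t = decide (3 ≤ pvLead a t) := by
  match t with
  | [] => simp [pvWinEq3, pvLead]
  | [b] => by_cases hb : b = a <;> simp [pvWinEq3, pvLead, hb]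
  | [b, c] => by_cases hb : b = a <;> by_cases hc : c = a <;> simp [pvWinEq3, pvLead, hb, hc]
  | b :: c :: d :: t =>
    by_cases hb : b = a <;> by_cases hc : c = a <;> by_cases hd : d = a <;>
      subst_eqs <;> simp_all [pvWinEq3, pvLead] <;> tauto

def pvRunsGo (cur : Char) (cnt : Nat) : List Char → List Nat
  | [] => [cnt]
  | c :: t => if c == cur then pvRunsGo cur (cnt + 1) t else cnt :: pvRunsGo c 1 t

theorem pvFoldl_runs (t : List Char) : ∀ (acc : List Nat) (a : Char) (n : Nat),
    (t.foldl pvRunStep (acc, a, n)).1 ++ [(t.foldl pvRunStep (acc, a, n)).2.2]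
      = acc ++ pvRunsGo a n t := by
  induction t with
  | nil => intro acc a n; simp [pvRunsGo]
  | cons c t ih =>
    intro acc a n
    by_cases h : c = a <;> simp only [List.foldl_cons, pvRunStep, pvRunsGo, h] <;> simp [h, ih]

theorem pvRunsGo_any4 (t : List Char) : ∀ (a : Char) (n : Nat),
    (pvRunsGo a n t).any (fun r => 4 ≤ r)
      = (decide (4 ≤ n + pvLead a t) || pvHasQuad t) := by
  induction t with
  | nil => intro a n; simp [pvRunsGo, pvLead, pvHasQuad]
  | cons b t ih =>
    intro a n
    by_cases h : b = a
    · subst h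
      simp only [pvRunsGo, pvLead, beq_self_eq_true, if_pos]
      rw [ih]
      simp only [pvHasQuad, pvWinEq3_eq]
      cases hq : pvHasQuad t <;> by_cases h3 : 3 ≤ pvLead b t <;> simp [h3] <;> omega
    · simp only [pvRunsGo, beq_iff_eq, h, if_false, List.any_cons]
      rw [ih]
      simp only [pvHasQuad, pvWinEq3_eq]
      have h0 : pvLead a (b :: t) = 0 := by simp [pvLead, h]
      rw [h0]
      cases hq : pvHasQuad t <;> by_cases h3 : 2 ≤ pvLead b t <;>
        by_cases h4 : 4 ≤ n <;> simp [h3, h4] <;> omega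

theorem pvWinEq2_eq (a : Char) (t : List Char) :
    pvWinEq2 a t = decide (2 ≤ pvLead a t) := by
  match t with
  | [] => simp [pvWinEq2, pvLead]
  | [b] => by_cases hb : b = a <;> simp [pvWinEq2, pvLead, hb]
  | b :: c :: t =>
    by_cases hb : b = a <;> by_cases hc : c = a <;>
      subst_eqs <;> simp_all [pvWinEq2, pvLead] <;> tauto

theorem pvRunsGo_any3 (t : List Char) : ∀ (a : Char) (n : Nat),
    (pvRunsGo a n t).any (fun r => 3 ≤ r)
      = (decide (3 ≤ n + pvLead a t) || pvHasTriple t) := by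
  induction t with
  | nil => intro a n; simp [pvRunsGo, pvLead, pvHasTriple]
  | cons b t ih =>
    intro a n
    by_cases h : b = a
    · subst h
      simp only [pvRunsGo, pvLead, beq_self_eq_true, if_pos]
      rw [ih]
      simp only [pvHasTriple, pvWinEq2_eq]
      cases hq : pvHasTriple t <;> by_cases h2 : 2 ≤ pvLead b t <;> simp [h2] <;> omega
    · simp only [pvRunsGo, beq_iff_eq, h, if_false, List.any_cons]
      rw [ih]
      simp only [pvHasTriple, pvWinEq2_eq]
      have h0 : pvLead a (b :: t) = 0 := by simp [pvLead, h]
      rw [h0]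
      cases hq : pvHasTriple t <;> by_cases h2 : 1 ≤ pvLead b t <;>
        by_cases h3 : 3 ≤ n <;> simp [h2, h3] <;> omega

theorem pvHasQuad_len (t : List Char) (h : pvHasQuad t = true) : 4 ≤ t.length := by
  induction t with
  | nil => simp [pvHasQuad] at h
  | cons a t ih =>
    simp only [pvHasQuad, Bool.or_eq_true] at h
    rcases h with h | h
    · match t, h with
      | b :: c :: d :: t, _ => simp <;> omega
    · have := ih h; simp <;> omega

theorem pvHasTriple_len (t : List Char) (h : pvHasTriple t = true) : 3 ≤ t.length := by
  induction t with
  | nil => simp [pvHasTriple] at h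
  | cons a t ih =>
    simp only [pvHasTriple, Bool.or_eq_true] at h
    rcases h with h | h
    · match t, h with
      | b :: c :: t, _ => simp <;> omega
    · have := ih h; simp <;> omega

theorem pvFoldlAdd_len (t : List Char) : ∀ (s : List Char),
    s.length ≤ (t.foldl PySem.Set.add s).length := by
  induction t with
  | nil => intro s; simp
  | cons c t ih =>
    intro s
    refine le_trans ?_ (ih (PySem.Set.add s c))
    simp [PySem.Set.add]
    split <;> simp

theorem pvFoldl_set_len (t : List Char) : ∀ (a : Char),
    ((t.foldl PySem.Set.add [a]).length == 1) = t.all (· == a) := by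
  induction t with
  | nil => intro a; simp
  | cons c t ih =>
    intro a
    by_cases hc : c = a
    · subst hc
      have h1 : PySem.Set.add [c] c = [c] := by simp [PySem.Set.add, PySem.Set.contains]
      simp only [List.foldl_cons, h1, List.all_cons, beq_self_eq_true, Bool.true_and]
      exact ih c
    · have hadd : PySem.Set.add [a] c = [a, c] := by
        simp [PySem.Set.add, PySem.Set.contains, hc]
      have hlen := pvFoldlAdd_len t [a, c]
      simp only [List.foldl_cons, hadd]
      have h2 : ((t.foldl PySem.Set.add [a, c]).length == 1) = false := by
        simp at hlen ⊢; omega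
      rw [h2]
      simp [hc]

theorem pvSet_len (t : List Char) (a : Char) :
    ((PySem.Set.ofList (a :: t)).length == 1) = t.all (· == a) := by
  have h : PySem.Set.ofList (a :: t) = t.foldl PySem.Set.add [a] := by
    rw [PySem.Set.ofList_eq_foldl]; rfl
  rw [h, pvFoldl_set_len]

theorem pvAsc_eq (t : List Char) : ∀ (a : Char),
    pvAscA (a :: t)
      = ((List.zip (a :: t) t).map (fun p => pvDigitVal p.2 - pvDigitVal p.1)).all (· == 1) := by
  induction t with
  | nil => intro a; simp [pvAscA]
  | cons b t ih =>
    intro a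
    rw [show pvAscA (a :: b :: t)
          = ((pvDigitVal b == pvDigitVal a + 1) && pvAscA (b :: t)) from rfl, ih b]
    simp only [List.zip_cons_cons, List.map_cons, List.all_cons]
    have : (pvDigitVal b == pvDigitVal a + 1) = (pvDigitVal b - pvDigitVal a == 1) := by
      by_cases h : pvDigitVal b = pvDigitVal a + 1 <;> simp [h] <;> omega
    rw [this]

theorem pvDesc_eq (t : List Char) : ∀ (a : Char),
    pvDescA (a :: t)
      = ((List.zip (a :: t) t).map (fun p => pvDigitVal p.2 - pvDigitVal p.1)).all (· == -1) := by
  induction t with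
  | nil => intro a; simp [pvDescA]
  | cons b t ih =>
    intro a
    rw [show pvDescA (a :: b :: t)
          = ((pvDigitVal b == pvDigitVal a - 1) && pvDescA (b :: t)) from rfl, ih b]
    simp only [List.zip_cons_cons, List.map_cons, List.all_cons]
    have : (pvDigitVal b == pvDigitVal a - 1) = (pvDigitVal b - pvDigitVal a == -1) := by
      by_cases h : pvDigitVal b = pvDigitVal a - 1 <;> simp [h] <;> omega
    rw [this]

-- ===== VERDICT (by name: the statement is the Claim_ definition above) =====
theorem calc_coins_spec : Claim_equal_calc_coins := by
  intro chars country _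
  show calc_coins chars country = calc_coins_alt chars country
  unfold calc_coins calc_coins_alt
  cases hd : List.filter (fun c => PySem.Chars.isdigit c) chars.toList with
  | nil => simp
  | cons d0 rest =>
    simp only [List.isEmpty_cons, PySem.List.slice_from_one, List.tail_cons]
    -- condition 100: len(set)==1 vs all == digits[0]
    rw [pvSet_len]
    -- run list: the foldl loop computes pvRunsGo d0 1 rest
    rw [show ((rest.foldl pvRunStep ([], d0, 1)).1 ++ [(rest.foldl pvRunStep ([], d0, 1)).2.2])
          = pvRunsGo d0 1 rest from pvFoldl_runs rest [] d0 1]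
    -- quad: the len>=4 guard is redundant, and the window scan equals the run test
    rw [show (decide (4 ≤ (d0 :: rest).length) && pvHasQuad (d0 :: rest))
          = (pvRunsGo d0 1 rest).any (fun r => 4 ≤ r) from by
      rw [pvRunsGo_any4]
      cases hq : pvHasQuad (d0 :: rest)
      · simp only [Bool.and_false]
        rw [show pvHasQuad (d0 :: rest) = (pvWinEq3 d0 rest || pvHasQuad rest) from rfl,
            pvWinEq3_eq] at hq
        simp only [Bool.or_eq_false_iff, decide_eq_false_iff_not] at hq
        simp [hq.1, hq.2]; omega
      · have hlen := pvHasQuad_len _ hq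
        simp only [List.length_cons] at hlen
        rw [show pvHasQuad (d0 :: rest) = (pvWinEq3 d0 rest || pvHasQuad rest) from rfl,
            pvWinEq3_eq] at hq
        simp only [List.length_cons]
        cases hq2 : pvHasQuad rest <;> simp_all <;> omega]
    -- triple: likewise with the len>=3 guard
    rw [show (decide (3 ≤ (d0 :: rest).length) && pvHasTriple (d0 :: rest))
          = (pvRunsGo d0 1 rest).any (fun r => 3 ≤ r) from by
      rw [pvRunsGo_any3]
      cases hq : pvHasTriple (d0 :: rest)
      · simp only [Bool.and_false]
        rw [show pvHasTriple (d0 :: rest) = (pvWinEq2 d0 rest || pvHasTriple rest) from rfl,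
            pvWinEq2_eq] at hq
        simp only [Bool.or_eq_false_iff, decide_eq_false_iff_not] at hq
        simp [hq.1, hq.2]; omega
      · have hlen := pvHasTriple_len _ hq
        simp only [List.length_cons] at hlen
        rw [show pvHasTriple (d0 :: rest) = (pvWinEq2 d0 rest || pvHasTriple rest) from rfl,
            pvWinEq2_eq] at hq
        simp only [List.length_cons]
        cases hq2 : pvHasTriple rest <;> simp_all <;> omega]
    -- beautiful: pairwise scans equal the diff-list tests, and the guard commutes
    rw [pvAsc_eq, pvDesc_eq, Bool.and_comm]
    -- all conditions now coincide; both sides are the same if-tree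
    simp [List.all_cons, and_comm]
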